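-- pv_equiv track=rewrite | github.com/patrick-projects/sqlmap-web-relay | tamper/ncharencode.py | tamper
-- ===== SOURCE A (Python) =====
-- def tamper(payload, **kwargs):
--     """
--     Replaces string literals with NCHAR() concatenation for SQL Server
--
--     Requirement:
--         * Microsoft SQL Server
--
--     Notes:
--         * Useful to bypass WAFs that block common SQL keywords in string
--           literals (e.g. 'admin' becomes NCHAR(97)+NCHAR(100)+NCHAR(109)+...)
--         * Reference: https://learn.microsoft.com/en-us/sql/t-sql/functions/nchar-transact-sql
--
--     >>> tamper("SELECT 'admin'")
--     "SELECT NCHAR(97)+NCHAR(100)+NCHAR(109)+NCHAR(105)+NCHAR(110)"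
--     """
--
--     retVal = payload
--
--     if payload:
--         retVal = ""
--         i = 0
--
--         while i < len(payload):
--             if payload[i] == '\'' and i + 1 < len(payload):
--                 # Find the closing quote
--                 j = payload.index('\'', i + 1) if '\'' in payload[i + 1:] else -1
--                 if j > i:
--                     string_content = payload[i + 1:j]
--                     if string_content:
--                         nchar_parts = [("NCHAR(%d)" % ord(c)) for c in string_content]
--                         retVal += "+".join(nchar_parts)
--                     else:
--                         retVal += "''"
--                     i = j + 1
--                     continue
--                 else:
--                     retVal += payload[i]
--             else:
--                 retVal += payload[i]
--
--             i += 1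
--
--     return retVal
-- ===== SOURCE B (Python) =====
-- def tamper(payload, **kwargs):
--     # Rewrites SQL string literals as NCHAR() concatenations by repeatedly
--     # partitioning the remaining payload at quote characters (two quotes per
--     # step), instead of A's index-based char-by-char scan with .index lookups.
--     if not payload:
--         return payload
--     out = []
--     rest = payload
--     while True:
--         head, sep, tail = rest.partition("'")
--         out.append(head)
--         if not sep:
--             break
--         inner, sep2, tail2 = tail.partition("'")
--         if not sep2:
--             out.append("'" + inner)
--             break
--         out.append("''" if not inner else "+".join("NCHAR(%d)" % ord(c) for c in inner))
--         rest = tail2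
--     return "".join(out)
-- ===== Notes on version B (the rewrite author's own statement) =====
-- stated objective: faster
-- what changed: A's index-driven char-by-char while loop (quadratic `retVal +=` string building and repeated `payload[i+1:]` slices/`.index` scans) is replaced by a loop that repeatedly partitions the remaining payload at quote characters, consuming a whole literal (two quotes) per step and joining the collected pieces once at the end.
import Mathlib
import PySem

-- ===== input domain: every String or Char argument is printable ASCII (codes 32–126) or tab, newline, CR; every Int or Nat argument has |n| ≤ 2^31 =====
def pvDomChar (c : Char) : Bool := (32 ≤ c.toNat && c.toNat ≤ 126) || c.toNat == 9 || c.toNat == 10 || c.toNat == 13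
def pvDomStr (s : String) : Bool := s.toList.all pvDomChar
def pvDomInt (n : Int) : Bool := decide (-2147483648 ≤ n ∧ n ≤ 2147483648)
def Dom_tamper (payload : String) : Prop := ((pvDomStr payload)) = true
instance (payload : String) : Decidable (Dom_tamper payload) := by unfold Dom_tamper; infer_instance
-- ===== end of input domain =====

-- B replaces A's index-based char-by-char scan (quadratic `retVal +=` string building with
-- `.index` quote pairing over slices) by repeated partitioning of the remaining payload at
-- quote characters, two quotes per step, joined once at the end (objective: faster, measured).

-- ===== PORT A =====

-- "NCHAR(%d)" % ord(c)
def ncharChars (c : Char) : List Char :=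
  "NCHAR(".toList ++ (PySem.Int.toStr (c.toNat : Int)).toList ++ [')']

-- the while-loop of A, state (retVal, i); `payload.index("'", i+1)` is PySem.Chars.findFrom
-- (equal to str.index here because it is guarded by `"'" in payload[i+1:]`)
def tamperGoA (cs : List Char) (retVal : List Char) (i : Nat) : List Char :=
  if hi : i < cs.length then
    if PySem.List.pyGet? cs (i : Int) = some '\'' ∧ i + 1 < cs.length then
      let j : Int :=
        if PySem.Chars.isIn ['\''] (PySem.List.slice cs (some ((i : Int) + 1)) none)
        then PySem.Chars.findFrom cs ['\''] ((i : Int) + 1) none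
        else -1
      if hj : (i : Int) < j then
        let content := PySem.List.slice cs (some ((i : Int) + 1)) (some j)
        let piece :=
          if content ≠ [] then PySem.Chars.join ['+'] (content.map ncharChars)
          else ['\'', '\'']
        tamperGoA cs (retVal ++ piece) (j.toNat + 1)
      else
        tamperGoA cs (retVal ++ [cs[i]]) (i + 1)
    else
      tamperGoA cs (retVal ++ [cs[i]]) (i + 1)
  else retVal
termination_by cs.length - i
decreasing_by · omega
              · omega
              · omega

def tamper (payload : String) : String :=
  if payload.toList ≠ [] then String.ofList (tamperGoA payload.toList [] 0)
  else payload

-- ===== PORT B =====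

-- "''" if not inner else "+".join("NCHAR(%d)" % ord(c) for c in inner)
def encAlt (inner : List Char) : List Char :=
  if inner = [] then ['\'', '\'']
  else PySem.Chars.join ['+'] (inner.map ncharChars)

-- the while-loop of B; `rest.partition("'")` with a one-char separator is exactly
-- (takeWhile (≠ '\''), dropWhile (≠ '\'')) — ported by hand, exact on all strings
def tamperGoB (rest : List Char) (out : List (List Char)) : List (List Char) :=
  let head := rest.takeWhile (fun c => c ≠ '\'')
  match ht : rest.dropWhile (fun c => c ≠ '\'') with
  | [] => out ++ [head]
  | _ :: tail =>
    let inner := tail.takeWhile (fun c => c ≠ '\'')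
    match ht2 : tail.dropWhile (fun c => c ≠ '\'') with
    | [] => out ++ [head, '\'' :: inner]
    | _ :: tail2 => tamperGoB tail2 (out ++ [head, encAlt inner])
termination_by rest.length
decreasing_by
  have h1 := List.length_dropWhile_le (fun c => decide (c ≠ '\'')) rest
  have h2 := List.length_dropWhile_le (fun c => decide (c ≠ '\'')) tail
  rw [ht] at h1; rw [ht2] at h2; simp at h1 h2; omega

def tamper_alt (payload : String) : String :=
  if payload.toList ≠ [] then
    String.ofList (PySem.Chars.join [] (tamperGoB payload.toList []))
  else payload

-- ===== PRECONDITION & SPEC =====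
def Spec_tamper (payload : String) (out : String) : Prop := out = tamper_alt payload
instance (payload : String) (out : String) : Decidable (Spec_tamper payload out) := by
  unfold Spec_tamper; infer_instance

-- ===== CLAIM (what is proved, stated in full; the proofs are below) =====
def Claim_equal_tamper : Prop := ∀ (payload : String), Dom_tamper payload → Spec_tamper payload (tamper payload)

-- ===== LEMMAS AND PROOFS =====

theorem join_nil_flatten (parts : List (List Char)) : PySem.Chars.join [] parts = parts.flatten := by
  induction parts with
  | nil => simp [PySem.Chars.join_nil]
  | cons x t ih =>
    cases t with
    | nil => simp [PySem.Chars.join_singleton]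
    | cons y tt => rw [PySem.Chars.join_cons_cons] at *; simp_all

theorem singleton_infix {a : Char} {l : List Char} : [a] <:+: l ↔ a ∈ l := by
  constructor
  · intro h; exact h.sublist.mem (List.mem_singleton_self a)
  · intro h
    obtain ⟨s, t, rfl⟩ := List.append_of_mem h
    exact ⟨s, t, by simp⟩

theorem tw_dw (rest : List Char) : ∀ (k : Nat), (hk : k < rest.length) → rest[k] = '\'' →
    (∀ j (hj : j < k), rest[j]'(by omega) ≠ '\'') →
    rest.takeWhile (fun c => c ≠ '\'') = rest.take k ∧
    rest.dropWhile (fun c => c ≠ '\'') = rest.drop k := by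
  induction rest with
  | nil => intro k hk; simp at hk
  | cons c r ih =>
    intro k hk hq hb
    cases k with
    | zero => simp at hq; simp [hq, List.dropWhile_cons]
    | succ k =>
      have hc : c ≠ '\'' := hb 0 (by omega)
      have := ih k (by simpa using hk) (by simpa using hq)
        (fun j hj => by have := hb (j+1) (by omega); simpa using this)
      rw [List.takeWhile_cons_of_pos (by simp [hc]), List.dropWhile_cons_of_pos (by simp [hc])]
      rw [List.take_succ_cons, List.drop_succ_cons, this.1, this.2]
      exact ⟨rfl, rfl⟩

theorem goB_acc (n : Nat) : ∀ (rest : List Char), rest.length ≤ n → ∀ out,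
    tamperGoB rest out = out ++ tamperGoB rest [] := by
  induction n with
  | zero =>
    intro rest h out
    have : rest = [] := by cases rest <;> simp_all
    subst this
    rw [tamperGoB.eq_def [] out, tamperGoB.eq_def [] []]; simp
  | succ n ih =>
    intro rest h out
    rw [tamperGoB.eq_def rest out, tamperGoB.eq_def rest []]
    have h1 := List.length_dropWhile_le (fun c => decide (c ≠ '\'')) rest
    split
    · simp
    · rename_i q tail ht
      have h2 := List.length_dropWhile_le (fun c => decide (c ≠ '\'')) tail
      split
      · simp
      · rename_i q2 tail2 ht2
        rw [ht] at h1; rw [ht2] at h2; simp at h1 h2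
        have hlen : tail2.length ≤ n := by omega
        conv_lhs => rw [ih tail2 hlen]
        conv_rhs => rw [ih tail2 hlen]
        simp

theorem no_quote_goB (rest : List Char) (h : '\'' ∉ rest) :
    tamperGoB rest [] = [rest] := by
  rw [tamperGoB.eq_def]
  have hmem : ∀ x ∈ rest, x ≠ '\'' := fun x hx hq => h (hq ▸ hx)
  have hd : rest.dropWhile (fun c => c ≠ '\'') = [] := by
    rw [List.dropWhile_eq_nil_iff]
    intro x hx; simpa using hmem x hx
  have htk : rest.takeWhile (fun c => c ≠ '\'') = rest := by
    rw [List.takeWhile_eq_self_iff]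
    intro x hx; simpa using hmem x hx
  split
  · simpa using hmem
  · rename_i q tail ht; rw [hd] at ht; exact absurd ht (by simp)

theorem goB_nil : tamperGoB [] [] = [[]] := by
  rw [tamperGoB.eq_def]; simp

theorem goB_flatten_cons_ne (c : Char) (rest : List Char) (hc : c ≠ '\'') :
    (tamperGoB (c :: rest) []).flatten = c :: (tamperGoB rest []).flatten := by
  rw [tamperGoB.eq_def (c :: rest) [], tamperGoB.eq_def rest []]
  rw [List.takeWhile_cons_of_pos (by simp [hc]), List.dropWhile_cons_of_pos (by simp [hc])]
  split
  · simp
  · rename_i q tail ht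
    split
    · simp
    · rename_i q2 tail2 ht2
      conv_lhs => rw [goB_acc tail2.length tail2 le_rfl]
      conv_rhs => rw [goB_acc tail2.length tail2 le_rfl]
      simp

theorem goB_quote_noquote (rest : List Char) (h : '\'' ∉ rest) :
    tamperGoB ('\'' :: rest) [] = [[], '\'' :: rest] := by
  rw [tamperGoB.eq_def]
  have hmem : ∀ x ∈ rest, x ≠ '\'' := fun x hx hq => h (hq ▸ hx)
  have hd : rest.dropWhile (fun c => c ≠ '\'') = [] := by
    rw [List.dropWhile_eq_nil_iff]; intro x hx; simpa using hmem x hx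
  have htk : rest.takeWhile (fun c => c ≠ '\'') = rest := by
    rw [List.takeWhile_eq_self_iff]; intro x hx; simpa using hmem x hx
  rw [List.takeWhile_cons_of_neg (by simp), List.dropWhile_cons_of_neg (by simp)]
  split
  · rename_i ht; simp at ht
  · rename_i q tail ht
    injection ht with hq htail
    subst htail
    rw [htk] at *
    split
    · simp
    · rename_i q2 tail2 ht2; rw [hd] at ht2; exact absurd ht2 (by simp)

theorem goB_single_quote : tamperGoB ['\''] [] = [[], ['\'']] := by
  simpa using goB_quote_noquote [] (by simp)

theorem goB_quote_pair (rest : List Char) (k : Nat) (hk : k < rest.length)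
    (hqk : rest[k] = '\'') (hb : ∀ j (hj : j < k), rest[j]'(by omega) ≠ '\'') :
    tamperGoB ('\'' :: rest) [] =
      [[], encAlt (rest.take k)] ++ tamperGoB (rest.drop (k + 1)) [] := by
  obtain ⟨htw, hdw⟩ := tw_dw rest k hk hqk hb
  rw [tamperGoB.eq_def]
  rw [List.takeWhile_cons_of_neg (by simp), List.dropWhile_cons_of_neg (by simp)]
  split
  · rename_i ht; simp at ht
  · rename_i q tail ht
    injection ht with hq htail
    subst htail
    rw [htw, hdw]
    have hdrop : rest.drop k = '\'' :: rest.drop (k + 1) := by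
      rw [List.drop_eq_getElem_cons hk, hqk]
    split
    · rename_i ht2; rw [hdrop] at ht2; exact absurd ht2 (by simp)
    · rename_i q2 tail2 ht2
      rw [hdrop] at ht2
      injection ht2 with _ htail2
      subst htail2
      rw [goB_acc (rest.drop (k+1)).length _ le_rfl]
      simp

theorem goA_done (cs : List Char) (i : Nat) (h : cs.length ≤ i) (retVal : List Char) :
    tamperGoA cs retVal i = retVal := by
  rw [tamperGoA.eq_def]; simp [Nat.not_lt.2 h]

theorem goA_eq (n : Nat) : ∀ (cs : List Char) (i : Nat), cs.length - i ≤ n → ∀ retVal,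
    tamperGoA cs retVal i = retVal ++ (tamperGoB (cs.drop i) []).flatten := by
  induction n with
  | zero =>
    intro cs i h retVal
    have hle : cs.length ≤ i := by omega
    rw [goA_done cs i hle, List.drop_eq_nil_of_le hle, goB_nil]
    simp
  | succ n ih =>
    intro cs i h retVal
    by_cases hi : i < cs.length
    · cases hs : cs.drop i with
      | nil => exfalso; have := List.length_drop (l := cs) (i := i); rw [hs] at this; simp at this; omega
      | cons c rest =>
        have hci : cs[i] = c := by
          have h0 : (cs.drop i)[0]'(by rw [hs]; simp) = c := by simp [hs]
          rw [List.getElem_drop] at h0; simpa using h0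
        have hrest : cs.drop (i + 1) = rest := by
          rw [← List.tail_drop, hs]; rfl
        rw [tamperGoA.eq_def]
        simp only [hi, dite_true, PySem.List.pyGet?_natCast, List.getElem?_eq_getElem hi, hci]
        by_cases hc : c = '\''
        · subst hc
          by_cases h1 : i + 1 < cs.length
          · simp only [h1, and_true, if_pos rfl]
            have hcast : (i : Int) + 1 = ((i + 1 : Nat) : Int) := by push_cast; ring
            have hslice : PySem.List.slice cs (some ((i : Int) + 1)) none = rest := by
              rw [hcast, PySem.List.slice_from cs (by positivity), Int.toNat_natCast, hrest]
            by_cases hqin : '\'' ∈ rest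
            · have hisin : PySem.Chars.isIn ['\''] (PySem.List.slice cs (some ((i : Int) + 1)) none) = true := by
                rw [hslice, PySem.Chars.isIn_iff_infix, singleton_infix]; exact hqin
              have hinf : ['\''] <:+: rest := singleton_infix.2 hqin
              have hfind_ne : PySem.Chars.find rest ['\''] ≠ -1 :=
                (PySem.Chars.find_ne_neg_one_iff rest ['\'']).2 hinf
              have hfind_nonneg : 0 ≤ PySem.Chars.find rest ['\''] :=
                (PySem.Chars.find_nonneg_iff rest ['\'']).2 hinf
              have hfrom : PySem.Chars.findFrom cs ['\''] ((i : Int) + 1) none =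
                  (i + 1 : Nat) + PySem.Chars.find rest ['\''] := by
                rw [hcast, PySem.Chars.findFrom_natCast cs ['\''] (i + 1) (by omega), hrest]
                simp [hfind_ne]
              set f := PySem.Chars.find rest ['\''] with hf
              set k := f.toNat with hkdef
              have hfk : f = (k : Int) := by omega
              obtain ⟨hpre, hnotpre⟩ := PySem.Chars.find_spec hfind_nonneg
              have hflen : f ≤ rest.length := PySem.Chars.find_le_length rest ['\'']
              have hdropne : rest.drop k ≠ [] := by
                intro hnil; rw [hnil] at hpre; exact absurd (List.prefix_nil.1 hpre) (by simp)
              have hklt : k < rest.length := by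
                by_contra hge
                exact hdropne (List.drop_eq_nil_of_le (by omega))
              have hqk : rest[k] = '\'' := by
                obtain ⟨t, htp⟩ := hpre
                have : rest.drop k = '\'' :: t := by simpa using htp.symm
                have h0 : (rest.drop k)[0]'(by rw [this]; simp) = '\'' := by simp [this]
                rw [List.getElem_drop] at h0; simpa using h0
              have hbj : ∀ j (hj : j < k), rest[j]'(by omega) ≠ '\'' := by
                intro j hj contra
                apply hnotpre j hj
                refine ⟨rest.drop (j + 1), ?_⟩
                conv_rhs => rw [List.drop_eq_getElem_cons (show j < rest.length by omega)]
                rw [contra]; rfl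
              simp only [hisin, if_pos rfl, hfrom]
              have hjgt : (i : Int) < (i + 1 : Nat) + f := by omega
              simp only [if_pos trivial]
              rw [dif_pos hjgt]
              have hcontent : PySem.List.slice cs (some ((i : Int) + 1)) (some ((i + 1 : Nat) + f)) =
                  rest.take k := by
                rw [hcast, PySem.List.slice_toNat cs (by positivity) (by omega)]
                simp only [Int.toNat_natCast]
                rw [hrest]
                congr 1
                omega
              rw [hcontent]
              have hnext : (((i + 1 : Nat) : Int) + f).toNat + 1 = i + 1 + (k + 1) := by omega
              rw [hnext]
              have hlen2 : cs.length - (i + 1 + (k + 1)) ≤ n := by omega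
              rw [ih cs (i + 1 + (k + 1)) hlen2]
              have hdrop2 : cs.drop (i + 1 + (k + 1)) = rest.drop (k + 1) := by
                rw [← List.drop_drop, hrest]
              rw [hdrop2, goB_quote_pair rest k hklt hqk hbj]
              have hpiece : (if rest.take k ≠ [] then PySem.Chars.join ['+'] ((rest.take k).map ncharChars)
                  else ['\'', '\'']) = encAlt (rest.take k) := by
                by_cases he : rest.take k = [] <;> simp [encAlt, he]
              rw [hpiece]
              simp
            · have hisin : PySem.Chars.isIn ['\''] (PySem.List.slice cs (some ((i : Int) + 1)) none) = false := by
                rw [hslice, PySem.Chars.isIn_eq_false_iff]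
                intro hin; exact hqin (singleton_infix.1 hin)
              simp only [hisin, Bool.false_eq_true, if_neg not_false]
              have hneg : ¬ ((i : Int) < -1) := by omega
              rw [dif_neg hneg]
              rw [ih cs (i + 1) (by omega), hrest]
              rw [no_quote_goB rest hqin, goB_quote_noquote rest hqin]
              simp
          · have hcond : ¬ ((some '\'' : Option Char) = some '\'' ∧ i + 1 < cs.length) := by
              intro ⟨_, hlt⟩; exact h1 hlt
            rw [if_neg hcond]
            have hrestnil : rest = [] := by
              have hl := List.length_drop (l := cs) (i := i)
              rw [hs] at hl; simp at hl
              cases rest with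
              | nil => rfl
              | cons x xs => exfalso; simp at hl; omega
            subst hrestnil
            rw [ih cs (i + 1) (by omega), hrest, goB_nil, goB_single_quote]
            simp
        · rw [if_neg (fun hcc => hc (Option.some.inj hcc.1))]
          rw [ih cs (i + 1) (by omega), hrest, goB_flatten_cons_ne c rest hc]
          simp
    · rw [goA_done cs i (by omega), List.drop_eq_nil_of_le (by omega), goB_nil]
      simp

-- ===== VERDICT (by name: the statement is the Claim_ definition above) =====
theorem tamper_spec : Claim_equal_tamper := by
  intro payload _
  unfold Spec_tamper tamper tamper_alt
  by_cases h : payload.toList = []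
  · simp [h]
  · simp only [h, if_pos, ne_eq, not_false_iff, if_true]
    rw [goA_eq (payload.toList.length) _ 0 (by omega), join_nil_flatten]
    simp
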